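-- pv_equiv track=rewrite | github.com/Yitian12321/BMI3_group_project | ProjectAssignment.py | find_coordinate_gaps
-- ===== SOURCE A (Python) =====
-- def find_coordinate_gaps(data):
--     prev_aa_coord = None
--     potential_gaps = []
--
--     for atom_coord, aa_coord in data:
--         if prev_aa_coord is not None and aa_coord != prev_aa_coord:
--             if aa_coord - prev_aa_coord > 1:
--                 # Found a potential gap
--                 potential_gaps.append((prev_aa_coord + 1, aa_coord - 1))
--         prev_aa_coord = aa_coord
--     return potential_gaps
-- ===== SOURCE B (Python) =====
-- def find_coordinate_gaps(data):
--     # Structural recursion: a gap list of x::y::rest is the gap between x and y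
--     # (if any) consed onto the gap list of y::rest; no threaded state.
--     if len(data) < 2:
--         return []
--     a = data[0][1]
--     b = data[1][1]
--     rest = find_coordinate_gaps(data[1:])
--     if b - a > 1:
--         return [(a + 1, b - 1)] + rest
--     return rest
-- ===== Notes on version B (the rewrite author's own statement) =====
-- stated objective: alternative
-- what changed: Replaces the stateful single-pass loop threading prev_aa_coord and an append-accumulator with a structural recursion on the list that builds the gap list back-to-front from the recursive call on the tail.
import Mathlib
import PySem

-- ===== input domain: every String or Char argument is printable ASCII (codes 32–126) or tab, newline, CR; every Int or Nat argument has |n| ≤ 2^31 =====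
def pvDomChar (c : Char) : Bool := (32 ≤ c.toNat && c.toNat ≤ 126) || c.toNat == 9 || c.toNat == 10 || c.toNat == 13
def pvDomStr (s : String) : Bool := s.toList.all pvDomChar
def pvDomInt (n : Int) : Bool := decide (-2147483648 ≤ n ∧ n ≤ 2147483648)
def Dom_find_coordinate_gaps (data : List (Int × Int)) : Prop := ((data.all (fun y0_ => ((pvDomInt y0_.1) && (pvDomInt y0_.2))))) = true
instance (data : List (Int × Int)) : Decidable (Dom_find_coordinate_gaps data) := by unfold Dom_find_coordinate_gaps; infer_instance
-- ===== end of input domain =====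

-- B: structural recursion on the list, building the gap list back-to-front from the recursive call on the tail, replacing A's stateful accumulator loop (alternative decomposition, same cost).
-- ===== PORT A =====
def find_coordinate_gaps (data : List (Int × Int)) : List (Int × Int) :=
  (data.foldl
    (fun (st : Option Int × List (Int × Int)) ab =>
      let gaps' :=
        match st.1 with
        | none => st.2
        | some p =>
          if ab.2 ≠ p then
            if ab.2 - p > 1 then st.2 ++ [(p + 1, ab.2 - 1)] else st.2
          else st.2
      (some ab.2, gaps'))
    (none, [])).2

-- ===== PORT B =====
def find_coordinate_gaps_alt : List (Int × Int) → List (Int × Int)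
  | [] => []
  | [_] => []
  | x :: y :: rest =>
    let tail := find_coordinate_gaps_alt (y :: rest)
    if y.2 - x.2 > 1 then (x.2 + 1, y.2 - 1) :: tail else tail

-- ===== PRECONDITION & SPEC =====
def Spec_find_coordinate_gaps (data : List (Int × Int)) (out : List (Int × Int)) : Prop := out = find_coordinate_gaps_alt data
instance (data : List (Int × Int)) (out : List (Int × Int)) : Decidable (Spec_find_coordinate_gaps data out) := by unfold Spec_find_coordinate_gaps; infer_instance

-- ===== CLAIM =====
def Claim_equal_find_coordinate_gaps : Prop := ∀ (data : List (Int × Int)), Dom_find_coordinate_gaps data → Spec_find_coordinate_gaps data (find_coordinate_gaps data)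

-- ===== LEMMAS AND PROOFS =====
theorem alt_snd_only (c d p : Int) (tl : List (Int × Int)) :
    find_coordinate_gaps_alt ((c, p) :: tl) = find_coordinate_gaps_alt ((d, p) :: tl) := by
  cases tl <;> simp [find_coordinate_gaps_alt]

theorem foldA_some (l : List (Int × Int)) : ∀ (p : Int) (gaps : List (Int × Int)),
    (l.foldl
      (fun (st : Option Int × List (Int × Int)) ab =>
        let gaps' :=
          match st.1 with
          | none => st.2
          | some p =>
            if ab.2 ≠ p then
              if ab.2 - p > 1 then st.2 ++ [(p + 1, ab.2 - 1)] else st.2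
            else st.2
        (some ab.2, gaps'))
      (some p, gaps)).2 = gaps ++ find_coordinate_gaps_alt ((0, p) :: l) := by
  induction l with
  | nil => intro p gaps; simp [find_coordinate_gaps_alt]
  | cons hd tl ih =>
    intro p gaps
    simp only [List.foldl_cons]
    rw [ih]
    by_cases h : hd.2 - p > 1
    · have hne : hd.2 ≠ p := by intro e; rw [e] at h; omega
      simpa [find_coordinate_gaps_alt, hne, h] using alt_snd_only 0 hd.1 hd.2 tl
    · by_cases hne : hd.2 ≠ p <;>
        simpa [find_coordinate_gaps_alt, hne, h] using alt_snd_only 0 hd.1 hd.2 tl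

-- ===== VERDICT =====
theorem find_coordinate_gaps_spec : Claim_equal_find_coordinate_gaps := by
  intro data _
  unfold Spec_find_coordinate_gaps find_coordinate_gaps
  cases data with
  | nil => rfl
  | cons hd tl =>
    simp only [List.foldl_cons]
    have := foldA_some tl hd.2 []
    simp only [List.nil_append] at this
    rw [this]
    cases tl <;> simp [find_coordinate_gaps_alt]
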